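-- pv_equiv track=rewrite | github.com/danielleraskin/Picture-Frame | picture_frame.py | create_picture_frame
-- ===== SOURCE A (Python) =====
-- def create_picture_frame(width, height, char):
--     """
--     creates frame of given width and height using given character
--     """
--     try:
--         w = int(width)
--     except:
--         print ('invalid')
--         return []
--
--     try:
--         h = int(height)
--     except:
--         print ('invalid')
--         return []
--
--     if not (w > 2 and h > 2):
--         print ('invalid!')
--         return []
--
--     picture_frame = []
--     firstlastline = []
--
--     for i in range(w):
--         firstlastline.append(char)
--     picture_frame.append(firstlastline)
--
--     for i in range(h - 2):
--         middleline = []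
--         middleline.append(char)
--         for j in range (w - 2):
--             middleline.append(" ")
--         middleline.append(char)
--         picture_frame.append(middleline)
--
--     picture_frame.append(firstlastline)
--
--     return picture_frame
-- ===== SOURCE B (Python) =====
-- def create_picture_frame(width, height, char):
--     """
--     creates frame of given width and height using given character
--     """
--     try:
--         w = int(width)
--     except:
--         print('invalid')
--         return []
--
--     try:
--         h = int(height)
--     except:
--         print('invalid')
--         return []
--
--     if not (w > 2 and h > 2):
--         print('invalid!')
--         return []
--
--     # cell-wise formula: a cell is the frame character iff it lies on the border
--     return [[char if r in (0, h - 1) or c in (0, w - 1) else " " for c in range(w)]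
--             for r in range(h)]
-- ===== Notes on version B (the rewrite author's own statement) =====
-- stated objective: simpler
-- what changed: Replaces the row-by-row construction (separate builds for the top/bottom row and each middle row with nested append loops) by a single nested comprehension that computes every cell directly from its coordinates (border iff r or c is extremal).
import Mathlib
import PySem

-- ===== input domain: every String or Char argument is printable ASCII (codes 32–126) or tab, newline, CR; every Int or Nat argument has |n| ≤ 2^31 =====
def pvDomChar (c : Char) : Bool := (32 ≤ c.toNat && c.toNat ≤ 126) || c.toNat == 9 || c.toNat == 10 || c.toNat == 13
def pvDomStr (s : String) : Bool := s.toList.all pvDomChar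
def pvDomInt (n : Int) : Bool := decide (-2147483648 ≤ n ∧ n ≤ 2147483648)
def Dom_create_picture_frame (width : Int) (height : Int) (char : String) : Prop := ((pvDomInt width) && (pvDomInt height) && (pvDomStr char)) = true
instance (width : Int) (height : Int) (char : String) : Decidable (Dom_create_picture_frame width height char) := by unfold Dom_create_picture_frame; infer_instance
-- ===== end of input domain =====

-- B replaces A's row-by-row construction by a single nested cell-wise comprehension
-- (border character iff the cell's row or column is extremal); objective: simpler.
-- Equivalence is about return values only (the prints on invalid input are side effects).

-- ===== PORT A =====
-- int(width)/int(height) on Int arguments are the identity and never raise, so the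
-- try/except branches are unreachable here.
def create_picture_frame (width : Int) (height : Int) (char : String) : List (List String) :=
  let w := width
  let h := height
  if ¬(w > 2 ∧ h > 2) then []
  else
    let firstlastline : List String :=
      (PySem.List.pyRange 0 w 1).foldl (fun acc _ => acc ++ [char]) []
    let picture_frame : List (List String) := [] ++ [firstlastline]
    let picture_frame :=
      (PySem.List.pyRange 0 (h - 2) 1).foldl (fun pf _ =>
        let middleline : List String := [] ++ [char]
        let middleline :=
          (PySem.List.pyRange 0 (w - 2) 1).foldl (fun m _ => m ++ [" "]) middleline
        let middleline := middleline ++ [char]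
        pf ++ [middleline]) picture_frame
    picture_frame ++ [firstlastline]

-- ===== PORT B =====
def create_picture_frame_alt (width : Int) (height : Int) (char : String) : List (List String) :=
  let w := width
  let h := height
  if ¬(w > 2 ∧ h > 2) then []
  else
    (List.range h.toNat).map (fun r =>
      (List.range w.toNat).map (fun c =>
        if r = 0 ∨ r = h.toNat - 1 ∨ c = 0 ∨ c = w.toNat - 1 then char else " "))

-- ===== PRECONDITION & SPEC =====
def Spec_create_picture_frame (width : Int) (height : Int) (char : String) (out : List (List String)) : Prop := out = create_picture_frame_alt width height char
instance (width : Int) (height : Int) (char : String) (out : List (List String)) : Decidable (Spec_create_picture_frame width height char out) := by unfold Spec_create_picture_frame; infer_instance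

-- ===== CLAIM (what is proved, stated in full; the proofs are below) =====
def Claim_equal_create_picture_frame : Prop := ∀ (width : Int) (height : Int) (char : String), Dom_create_picture_frame width height char → Spec_create_picture_frame width height char (create_picture_frame width height char)

-- ===== LEMMAS AND PROOFS =====

/-- A loop that appends one fixed element per iteration builds `init ++ replicate`. -/
theorem foldl_append_const {α β : Type} (l : List α) (init : List β) (x : β) :
    l.foldl (fun acc _ => acc ++ [x]) init = init ++ List.replicate l.length x := by
  induction l generalizing init with
  | nil => simp
  | cons a t ih => simp [List.foldl_cons, ih, List.append_assoc, List.replicate_succ]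

/-- Splitting `(List.range n).map f` into first element, middle, last element (n ≥ 3). -/
theorem range_map_ends {α : Type} (n : Nat) (hn : 3 ≤ n) (f : Nat → α) :
    (List.range n).map f
      = f 0 :: ((List.range (n - 2)).map (fun i => f (i + 1)) ++ [f (n - 1)]) := by
  obtain ⟨j, rfl⟩ : ∃ j, n = j + 3 := ⟨n - 3, by omega⟩
  have h1 : List.range (j + 3) = List.range (j + 2) ++ [j + 2] := List.range_succ
  have h2 : List.range (j + 2) = 0 :: (List.range (j + 1)).map (· + 1) := by
    simpa [Nat.succ_eq_add_one] using (List.range_succ_eq_map (n := j + 1))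
  simp [h1, h2, Function.comp]

-- ===== VERDICT (by name: the statement is the Claim_ definition above) =====
theorem create_picture_frame_spec : Claim_equal_create_picture_frame := by
  intro width height char _
  show create_picture_frame width height char = create_picture_frame_alt width height char
  unfold create_picture_frame create_picture_frame_alt
  dsimp only
  by_cases hcond : width > 2 ∧ height > 2
  · obtain ⟨hw, hh⟩ := hcond
    rw [if_neg (not_not_intro ⟨hw, hh⟩), if_neg (not_not_intro ⟨hw, hh⟩)]
    have hwN : 3 ≤ width.toNat := by omega
    have hhN : 3 ≤ height.toNat := by omega
    have ha1 : (PySem.List.pyRange 0 width 1).length = width.toNat := by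
      simp [PySem.List.length_pyRange_one]
    have ha2 : (PySem.List.pyRange 0 (height - 2) 1).length = height.toNat - 2 := by
      simp [PySem.List.length_pyRange_one]; omega
    have ha3 : (PySem.List.pyRange 0 (width - 2) 1).length = width.toNat - 2 := by
      simp [PySem.List.length_pyRange_one]; omega
    rw [range_map_ends height.toNat hhN]
    have hmidrow : ∀ i ∈ List.range (height.toNat - 2),
        (List.range width.toNat).map
          (fun c => if i + 1 = 0 ∨ i + 1 = height.toNat - 1 ∨ c = 0 ∨ c = width.toNat - 1
                    then char else " ")
          = char :: (List.replicate (width.toNat - 2) " " ++ [char]) := by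
      intro i hi
      rw [List.mem_range] at hi
      rw [range_map_ends width.toNat hwN]
      have hr0 : ¬ (i + 1 = 0) := by omega
      have hr1 : ¬ (i + 1 = height.toNat - 1) := by omega
      have hcell : ∀ c ∈ List.range (width.toNat - 2),
          (if i + 1 = 0 ∨ i + 1 = height.toNat - 1 ∨ c + 1 = 0 ∨ c + 1 = width.toNat - 1
           then char else " ") = " " := by
        intro c hc
        rw [List.mem_range] at hc
        rw [if_neg (by omega)]
      rw [List.map_congr_left hcell]
      simp [hr1, List.map_const', show width.toNat - 1 ≠ 0 by omega]
    rw [List.map_congr_left hmidrow]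
    simp only [foldl_append_const, ha1, ha2, ha3]
    have hbig : 2 ≤ width.toNat := by omega
    simp [List.map_const', show height.toNat - 1 ≠ 0 by omega,
          show List.replicate width.toNat char
                 = char :: (List.replicate (width.toNat - 2) char ++ [char]) by
            have : width.toNat = (width.toNat - 2) + 1 + 1 := by omega
            conv_lhs => rw [this]
            rw [List.replicate_succ, List.replicate_succ']]
  · rw [if_pos hcond, if_pos hcond]
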